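-- pv_equiv track=rewrite | github.com/cowsking/projects-CS61A | hog/hog.py | swap_strategy
-- ===== SOURCE A (Python) =====
-- def free_bacon(opponent_score):
--     """Return the points scored from rolling 0 dice (Free Bacon)."""
--     # BEGIN PROBLEM 2
--     "*** REPLACE THIS LINE ***"
--     a = opponent_score
--     b = a // 10
--     c = a % 10
--     return max(b, c) + 1
--
-- def if_prime(number):
--     if number == 1:
--         return False
--     k = 2
--     while k < number:
--         if number % k == 0:
--             return False
--         k += 1
--     return True
--
-- def swap_strategy(score, opponent_score, margin=8, num_rolls=4):
--     """This strategy rolls 0 dice when it triggers a beneficial swap. It also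
--     rolls 0 dice if it gives at least MARGIN points. Otherwise, it rolls
--     NUM_ROLLS.
--     """
--     # BEGIN PROBLEM 11
--     "*** REPLACE THIS LINE ***"
--     score0 = free_bacon(opponent_score)
--     if if_prime(score0):
--         while True:
--             score0 += 1
--             if if_prime(score0):
--                 if score0 >= margin or (score + score0)* 2 == opponent_score:
--                     return 0
--                 else:
--                     return num_rolls
--     elif score0 >= margin or (score + score0)* 2 == opponent_score:
--         return 0
--     return num_rolls
-- ===== SOURCE B (Python) =====
-- def _is_prime(n):
--     """6k+-1 wheel trial division; False below 2."""
--     if n < 2: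
--         return False
--     if n < 4:
--         return True
--     if n % 2 == 0 or n % 3 == 0:
--         return False
--     k = 5
--     while k * k <= n:
--         if n % k == 0 or n % (k + 2) == 0:
--             return False
--         k += 6
--     return True
--
-- def swap_strategy(score, opponent_score, margin=8, num_rolls=4):
--     s = max(opponent_score // 10, opponent_score % 10) + 1
--     if _is_prime(s):
--         if s == 2:
--             s = 3
--         else:
--             s += 2
--             while not _is_prime(s):
--                 s += 2
--     return 0 if s >= margin or (score + s) * 2 == opponent_score else num_rolls
-- ===== Notes on version B (the rewrite author's own statement) =====
-- stated objective: faster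
-- what changed: Primality by a 6k+-1 wheel trial division bounded by sqrt(n) instead of A's run-to-n loop, and the prime-advance search stepping +2 over odd candidates (with the 2 -> 3 case closed-form) instead of A's +1 scan with duplicated branch logic.
import Mathlib
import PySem

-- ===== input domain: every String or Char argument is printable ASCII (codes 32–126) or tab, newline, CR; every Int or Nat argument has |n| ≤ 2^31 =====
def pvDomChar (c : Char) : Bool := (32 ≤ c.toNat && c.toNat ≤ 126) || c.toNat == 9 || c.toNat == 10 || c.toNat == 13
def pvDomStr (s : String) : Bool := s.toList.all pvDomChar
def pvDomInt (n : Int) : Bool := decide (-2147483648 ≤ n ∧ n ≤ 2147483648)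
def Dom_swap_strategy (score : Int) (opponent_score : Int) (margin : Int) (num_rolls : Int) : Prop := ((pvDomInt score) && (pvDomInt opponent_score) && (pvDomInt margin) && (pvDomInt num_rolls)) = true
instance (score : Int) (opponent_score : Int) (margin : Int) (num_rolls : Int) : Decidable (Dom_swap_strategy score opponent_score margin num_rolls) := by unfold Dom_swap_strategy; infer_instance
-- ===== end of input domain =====

-- B replaces A's run-to-n trial division by a 6k±1 wheel bounded by √n and A's +1
-- prime-advance scan by a 2-and-odd-step scan (objective: faster).

-- ===== PORT A =====
def pvFreeBacon (opponent_score : Int) : Int :=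
  let a := opponent_score
  let b := PySem.Int.floordiv a 10
  let c := PySem.Int.mod a 10
  max b c + 1

-- `while k < number` of if_prime; k starts at 2 and only grows.  The fuel counter only
-- makes the recursion structural: it starts at (number-2).toNat, which covers every
-- iteration the Python loop performs, so the fuel-exhausted branch is never reached.
def pvLoopA (number : Int) (fuel : Nat) (k : Nat) : Bool :=
  if (k : Int) < number then
    if PySem.Int.mod number (k : Int) == 0 then false
    else
      match fuel with
      | 0 => true            -- unreachable for the initial fuel
      | fuel + 1 => pvLoopA number fuel (k + 1)
  else true

def pvIfPrime (number : Int) : Bool :=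
  if number == 1 then false
  else pvLoopA number (number - 2).toNat 2

-- `while True: score0 += 1; if if_prime(score0): <return>` of swap_strategy, as the search
-- for the first accepted value.  The fuel 2*s.toNat+4 covers the search on every input it
-- is run with (for s ≥ 1 a prime ≤ 2s follows s by Bertrand's postulate; for s ≤ 0 the
-- test accepts within two steps), so the fuel-exhausted branch is never reached.
def pvNextLoopA (fuel : Nat) (s : Int) : Int :=
  let s' := s + 1
  if pvIfPrime s' then s'
  else
    match fuel with
    | 0 => s'              -- unreachable for the initial fuel
    | fuel + 1 => pvNextLoopA fuel s'

def pvNextA (s : Int) : Int := pvNextLoopA (2 * s.toNat + 4) s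

def swap_strategy (score : Int) (opponent_score : Int) (margin : Int) (num_rolls : Int) : Int :=
  let score0 := pvFreeBacon opponent_score
  if pvIfPrime score0 then
    let s := pvNextA score0
    if s ≥ margin ∨ (score + s) * 2 = opponent_score then 0 else num_rolls
  else if score0 ≥ margin ∨ (score + score0) * 2 = opponent_score then 0
  else num_rolls

-- ===== PORT B =====
-- the 6k±1 wheel `while k * k <= n: if n % k == 0 or n % (k+2) == 0 …; k += 6` of
-- _is_prime; the fuel only makes the recursion structural (it starts at n.toNat, which
-- covers every iteration), the fuel-exhausted branch is never reached
def pvWheel (n : Int) (fuel : Nat) (k : Nat) : Bool :=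
  if (k : Int) * (k : Int) ≤ n then
    if PySem.Int.mod n (k : Int) == 0 || PySem.Int.mod n ((k : Int) + 2) == 0 then false
    else
      match fuel with
      | 0 => true            -- unreachable for the initial fuel
      | fuel + 1 => pvWheel n fuel (k + 6)
  else true

def pvIsPrimeB (n : Int) : Bool :=
  if n < 2 then false
  else if n < 4 then true
  else if PySem.Int.mod n 2 == 0 || PySem.Int.mod n 3 == 0 then false
  else pvWheel n n.toNat 5

-- `s += 2; while not _is_prime(s): s += 2` of B; fuel s.toNat + 2 covers the scan
-- (a prime ≤ 2s follows every prime s ≥ 3 by Bertrand), the 0-branch is unreachable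
def pvOddScan (fuel : Nat) (s : Int) : Int :=
  let s' := s + 2
  if pvIsPrimeB s' then s'
  else
    match fuel with
    | 0 => s'              -- unreachable for the initial fuel
    | fuel + 1 => pvOddScan fuel s'

def swap_strategy_alt (score : Int) (opponent_score : Int) (margin : Int) (num_rolls : Int) : Int :=
  let s0 := max (PySem.Int.floordiv opponent_score 10) (PySem.Int.mod opponent_score 10) + 1
  let s := if pvIsPrimeB s0 then (if s0 = 2 then 3 else pvOddScan (s0.toNat + 2) s0) else s0
  if s ≥ margin ∨ (score + s) * 2 = opponent_score then 0 else num_rolls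

-- ===== PRECONDITION & SPEC =====
def Spec_swap_strategy (score : Int) (opponent_score : Int) (margin : Int) (num_rolls : Int) (out : Int) : Prop := out = swap_strategy_alt score opponent_score margin num_rolls
instance (score : Int) (opponent_score : Int) (margin : Int) (num_rolls : Int) (out : Int) : Decidable (Spec_swap_strategy score opponent_score margin num_rolls out) := by unfold Spec_swap_strategy; infer_instance

-- ===== CLAIM (what is proved, stated in full; the proofs are below) =====
def Claim_equal_swap_strategy : Prop := ∀ (score : Int) (opponent_score : Int) (margin : Int) (num_rolls : Int), Dom_swap_strategy score opponent_score margin num_rolls → Spec_swap_strategy score opponent_score margin num_rolls (swap_strategy score opponent_score margin num_rolls)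

-- ===== LEMMAS AND PROOFS =====

-- characterisation of A's run-to-n loop (for any sufficient fuel)
theorem pvLoopA_true_iff (n : Int) :
    ∀ (fuel k : Nat), (n - (k : Int)).toNat ≤ fuel →
    (pvLoopA n fuel k = true ↔ ∀ j : Nat, k ≤ j → (j : Int) < n → ¬ ((j : Int) ∣ n)) := by
  intro fuel
  induction fuel with
  | zero =>
      intro k hd
      have hnk : ¬ ((k : Int) < n) := by omega
      unfold pvLoopA
      simp only [hnk, if_false, true_iff]
      intro j hj hjn
      exact absurd hjn (by omega)
  | succ d ih =>
      intro k hd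
      unfold pvLoopA
      split
      · rename_i hlt
        by_cases hmod : PySem.Int.mod n (k : Int) = 0
        · have hdvd : (k : Int) ∣ n := (PySem.Int.mod_eq_zero_iff_dvd _ _).mp hmod
          simp only [beq_iff_eq, hmod, if_true]
          constructor
          · intro h; exact absurd h (by simp)
          · intro h; exact absurd hdvd (h k le_rfl hlt)
        · simp only [beq_iff_eq, hmod, if_false]
          rw [ih (k + 1) (by push_cast; omega)]
          constructor
          · intro h j hj hjn
            rcases Nat.eq_or_lt_of_le hj with rfl | hlt'
            · exact fun hd' => hmod ((PySem.Int.mod_eq_zero_iff_dvd _ _).mpr hd')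
            · exact h j hlt' hjn
          · intro h j hj hjn
            exact h j (by omega) hjn
      · rename_i hnk
        simp only [true_iff]
        intro j hj hjn
        have : (k : Int) ≤ (j : Int) := by exact_mod_cast hj
        omega

theorem pvIfPrime_iff (n : Int) (h2 : 2 ≤ n) : pvIfPrime n = true ↔ Nat.Prime n.toNat := by
  have hne : ¬ (n = 1) := by omega
  have hcast : ((n.toNat : Int)) = n := Int.toNat_of_nonneg (by omega)
  unfold pvIfPrime
  simp only [beq_iff_eq, hne, if_false]
  rw [pvLoopA_true_iff n (n - 2).toNat 2 (by omega)]
  rw [Nat.prime_def_lt']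
  constructor
  · intro h
    refine ⟨by omega, fun m hm hmlt hdvd => ?_⟩
    refine h m hm ?_ ?_
    · rw [← hcast]; exact_mod_cast hmlt
    · rw [← hcast]; exact_mod_cast hdvd
  · intro ⟨_, h⟩ j hj hjn hjdvd
    refine h j hj ?_ ?_
    · rw [← hcast] at hjn; exact_mod_cast hjn
    · rw [← hcast] at hjdvd; exact_mod_cast hjdvd

-- characterisation of B's wheel loop: run with sufficient fuel from k, it reports that no
-- candidate k+6i with square ≤ n, and no k+6i+2 alongside it, divides n
theorem pvWheel_true_iff (n : Int) :
    ∀ (fuel k : Nat), (n + 1 - (k : Int) * (k : Int)).toNat ≤ fuel →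
    (pvWheel n fuel k = true ↔
      ∀ i : Nat, ((k : Int) + 6 * i) * ((k : Int) + 6 * i) ≤ n →
        ¬ (((k : Int) + 6 * i) ∣ n) ∧ ¬ (((k : Int) + 6 * i + 2) ∣ n)) := by
  intro fuel
  induction fuel with
  | zero =>
      intro k hd
      have hnk : ¬ ((k : Int) * (k : Int) ≤ n) := by omega
      unfold pvWheel
      simp only [hnk, if_false, true_iff]
      intro i hi
      have h0 : (0 : Int) ≤ (k : Int) := by positivity
      have h6 : (0 : Int) ≤ 6 * (i : Int) := by positivity
      nlinarith
  | succ d ih =>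
      intro k hd
      unfold pvWheel
      split
      · rename_i hle
        by_cases hmod : PySem.Int.mod n (k : Int) = 0 ∨ PySem.Int.mod n ((k : Int) + 2) = 0
        · have hcond : (PySem.Int.mod n (k : Int) == 0 || PySem.Int.mod n ((k : Int) + 2) == 0) = true := by
            rcases hmod with h | h <;> simp [h]
          simp only [hcond, if_true]
          constructor
          · intro h; exact absurd h (by simp)
          · intro h
            have h0 := h 0 (by push_cast; simpa using hle)
            exfalso
            rcases hmod with hv | hv
            · exact h0.1 (by simpa using (PySem.Int.mod_eq_zero_iff_dvd _ _).mp hv)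
            · exact h0.2 (by simpa using (PySem.Int.mod_eq_zero_iff_dvd _ _).mp hv)
        · push_neg at hmod
          have hcond : (PySem.Int.mod n (k : Int) == 0 || PySem.Int.mod n ((k : Int) + 2) == 0) = false := by
            simp [hmod.1, hmod.2]
          simp only [hcond, Bool.false_eq_true, if_false]
          have hk0 : (0 : Int) ≤ (k : Int) := by positivity
          have hkk : (k : Int) * (k : Int) + 1 ≤ ((k : Int) + 6) * ((k : Int) + 6) := by nlinarith
          rw [ih (k + 6) (by push_cast; omega)]
          constructor
          · intro h i hi
            rcases i with _ | j
            · refine ⟨fun hv => hmod.1 ((PySem.Int.mod_eq_zero_iff_dvd _ _).mpr ?_),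
                      fun hv => hmod.2 ((PySem.Int.mod_eq_zero_iff_dvd _ _).mpr ?_)⟩
              · simpa using hv
              · simpa using hv
            · have he : (k : Int) + 6 * ((j + 1 : Nat) : Int)
                  = ((k + 6 : Nat) : Int) + 6 * (j : Int) := by push_cast; ring
              rw [he] at hi ⊢
              exact h j hi
          · intro h j hj
            have he : ((k + 6 : Nat) : Int) + 6 * (j : Int)
                = (k : Int) + 6 * ((j + 1 : Nat) : Int) := by push_cast; ring
            rw [he] at hj ⊢
            exact h (j + 1) hj
      · rename_i hnk
        simp only [true_iff]
        intro i hi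
        have h0 : (0 : Int) ≤ (k : Int) := by positivity
        have h6 : (0 : Int) ≤ 6 * (i : Int) := by positivity
        nlinarith

theorem pvIsPrimeB_iff (n : Int) (h2 : 2 ≤ n) : pvIsPrimeB n = true ↔ Nat.Prime n.toNat := by
  have hcast : ((n.toNat : Int)) = n := Int.toNat_of_nonneg (by omega)
  set m := n.toNat with hm
  unfold pvIsPrimeB
  have hn2 : ¬ (n < 2) := by omega
  simp only [hn2, if_false]
  by_cases h4 : n < 4
  · have hm' : m = 2 ∨ m = 3 := by omega
    simp only [h4, if_true, true_iff]
    rcases hm' with h | h <;> rw [h]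
    · exact Nat.prime_two
    · exact Nat.prime_three
  · simp only [h4, if_false]
    have hm4 : 4 ≤ m := by omega
    by_cases hmod : PySem.Int.mod n 2 = 0 ∨ PySem.Int.mod n 3 = 0
    · have hcond : (PySem.Int.mod n 2 == 0 || PySem.Int.mod n 3 == 0) = true := by
        rcases hmod with h | h <;> simp [h, (PySem.Int.mod_eq_zero_iff_dvd _ _).mp h]
      simp only [hcond, if_true]
      constructor
      · intro h; exact absurd h (by simp)
      · intro hp
        rcases hmod with h | h
        · have hdvd : (2 : Int) ∣ n := (PySem.Int.mod_eq_zero_iff_dvd _ _).mp h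
          have hdm : 2 ∣ m := by rw [← hcast] at hdvd; exact_mod_cast hdvd
          have := Nat.Prime.eq_one_or_self_of_dvd hp 2 hdm
          omega
        · have hdvd : (3 : Int) ∣ n := (PySem.Int.mod_eq_zero_iff_dvd _ _).mp h
          have hdm : 3 ∣ m := by rw [← hcast] at hdvd; exact_mod_cast hdvd
          have := Nat.Prime.eq_one_or_self_of_dvd hp 3 hdm
          omega
    · push_neg at hmod
      have hnd2 : ¬ (2 ∣ m) := fun h =>
        hmod.1 ((PySem.Int.mod_eq_zero_iff_dvd _ _).mpr (by rw [← hcast]; exact_mod_cast h))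
      have hnd3 : ¬ (3 ∣ m) := fun h =>
        hmod.2 ((PySem.Int.mod_eq_zero_iff_dvd _ _).mpr (by rw [← hcast]; exact_mod_cast h))
      have hm5 : 5 ≤ m := by
        rcases Nat.lt_or_ge m 5 with h | h
        · interval_cases m
          · exact absurd ⟨2, rfl⟩ hnd2
        · exact h
      have hcond : (PySem.Int.mod n 2 == 0 || PySem.Int.mod n 3 == 0) = false := by
        simp only [Bool.or_eq_false_iff, beq_eq_false_iff_ne, ne_eq]
        exact ⟨hmod.1, hmod.2⟩
      simp only [hcond, Bool.false_eq_true, if_false]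
      rw [pvWheel_true_iff n n.toNat 5 (by push_cast; omega)]
      push_cast
      constructor
      · -- wheel clean ⇒ prime
        intro h
        by_contra hnp
        have hp := Nat.minFac_prime (n := m) (by omega)
        have hpd : m.minFac ∣ m := Nat.minFac_dvd m
        have hsq : m.minFac ^ 2 ≤ m := Nat.minFac_sq_le_self (by omega) hnp
        set p := m.minFac with hpdef
        have hpm : p * p ≤ m := by rw [pow_two] at hsq; exact hsq
        have hp2 : p ≠ 2 := fun h' => hnd2 (h' ▸ hpd)
        have hp3 : p ≠ 3 := fun h' => hnd3 (h' ▸ hpd)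
        have hpp2 : 2 ≤ p := hp.two_le
        have hodd : p % 2 = 1 := (Nat.Prime.eq_two_or_odd hp).resolve_left hp2
        have hm3 : p % 3 ≠ 0 := by
          intro h'
          rcases Nat.Prime.eq_one_or_self_of_dvd hp 3 (Nat.dvd_of_mod_eq_zero h') with h'' | h'' <;> omega
        have hp5 : 5 ≤ p := by omega
        have hpdInt : (p : Int) ∣ n := by rw [← hcast]; exact_mod_cast hpd
        have hpmInt : (p : Int) * (p : Int) ≤ n := by rw [← hcast]; exact_mod_cast hpm
        have hp6 : p % 6 = 1 ∨ p % 6 = 5 := by omega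
        rcases hp6 with h6 | h6
        · have hp7 : 7 ≤ p := by omega
          obtain ⟨i, hi⟩ : ∃ i, p = 7 + 6 * i := ⟨(p - 7) / 6, by omega⟩
          have hpe : ((5 : Int) + 6 * (i : Int) + 2) = (p : Int) := by push_cast [hi]; ring
          have hpe2 : ((5 : Int) + 6 * (i : Int)) = (p : Int) - 2 := by push_cast [hi]; ring
          have hcnd : ((5 : Int) + 6 * (i : Int)) * ((5 : Int) + 6 * (i : Int)) ≤ n := by
            rw [hpe2]
            have h7 : (7 : Int) ≤ (p : Int) := by exact_mod_cast hp7
            nlinarith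
          exact (h i hcnd).2 (by rw [hpe]; exact hpdInt)
        · obtain ⟨i, hi⟩ : ∃ i, p = 5 + 6 * i := ⟨(p - 5) / 6, by omega⟩
          have hpe : ((5 : Int) + 6 * (i : Int)) = (p : Int) := by push_cast [hi]; ring
          have hcnd : ((5 : Int) + 6 * (i : Int)) * ((5 : Int) + 6 * (i : Int)) ≤ n := by
            rw [hpe]; exact hpmInt
          exact (h i hcnd).1 (by rw [hpe]; exact hpdInt)
      · -- prime ⇒ wheel clean
        intro hp i hi
        have he1 : ((5 + 6 * i : Nat) : Int) = (5 : Int) + 6 * (i : Int) := by push_cast; ring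
        have he2 : ((5 + 6 * i + 2 : Nat) : Int) = (5 : Int) + 6 * (i : Int) + 2 := by push_cast; ring
        have hsqn : (5 + 6 * i) * (5 + 6 * i) ≤ m := by
          have : ((5 + 6 * i : Nat) : Int) * ((5 + 6 * i : Nat) : Int) ≤ n := by rw [he1]; exact hi
          rw [← hcast] at this
          exact_mod_cast this
        constructor
        · intro hv
          have hvm : (5 + 6 * i) ∣ m := by
            rw [← hcast] at hv
            rw [← he1] at hv
            exact_mod_cast hv
          rcases Nat.Prime.eq_one_or_self_of_dvd hp _ hvm with h | h
          · omega
          · nlinarith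
        · intro hv
          have hvm : (5 + 6 * i + 2) ∣ m := by
            rw [← hcast] at hv
            rw [← he2] at hv
            exact_mod_cast hv
          rcases Nat.Prime.eq_one_or_self_of_dvd hp _ hvm with h | h
          · omega
          · nlinarith

theorem pvPrime_agree (n : Int) (h1 : 1 ≤ n) : pvIfPrime n = pvIsPrimeB n := by
  rcases eq_or_lt_of_le h1 with h | h
  · rw [← h]; decide
  · have h2 : 2 ≤ n := by omega
    have hA := pvIfPrime_iff n h2
    have hB := pvIsPrimeB_iff n h2
    cases hA' : pvIfPrime n <;> cases hB' : pvIsPrimeB n <;> simp_all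

-- A's +1-scan returns the first accepted value past s, fuel permitting
theorem pvScanA_eq (t : Int) : ∀ (f : Nat) (s : Int), pvIfPrime t = true →
    (∀ u, s < u → u < t → pvIfPrime u = false) → s < t → t ≤ s + f + 1 →
    pvNextLoopA f s = t := by
  intro f
  induction f with
  | zero =>
      intro s _ hmin hst hf
      have he : pvNextLoopA 0 s = s + 1 := by
        unfold pvNextLoopA
        split <;> (try omega) <;> simp
      omega
  | succ d ih =>
      intro s ht hmin hst hf
      by_cases hp : pvIfPrime (s + 1) = true
      · have he : t = s + 1 := by
          by_contra hne
          rw [hmin (s + 1) (by omega) (by omega)] at hp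
          exact absurd hp (by simp)
        unfold pvNextLoopA
        simp [hp, he]
      · have hpf : pvIfPrime (s + 1) = false := by
          cases h : pvIfPrime (s + 1)
          · rfl
          · exact absurd h hp
        have hne : t ≠ s + 1 := fun h => hp (h ▸ ht)
        unfold pvNextLoopA
        simp only [hpf, Bool.false_eq_true, if_false]
        exact ih (s + 1) ht (fun u hu1 hu2 => hmin u (by omega) hu2) (by omega) (by omega)

-- B's +2-scan returns the first accepted value of s's parity past s, fuel permitting
theorem pvScanB_eq (t : Int) : ∀ (f : Nat) (s : Int), pvIsPrimeB t = true →
    (∀ u, s < u → u < t → u % 2 = s % 2 → pvIsPrimeB u = false) → s < t → t % 2 = s % 2 →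
    t ≤ s + 2 * f + 2 → pvOddScan f s = t := by
  intro f
  induction f with
  | zero =>
      intro s _ hmin hst hpar hf
      have he : pvOddScan 0 s = s + 2 := by
        unfold pvOddScan
        split <;> (try omega) <;> simp
      omega
  | succ d ih =>
      intro s ht hmin hst hpar hf
      by_cases hp : pvIsPrimeB (s + 2) = true
      · have he : t = s + 2 := by
          by_contra hne
          rw [hmin (s + 2) (by omega) (by omega) (by omega)] at hp
          exact absurd hp (by simp)
        unfold pvOddScan
        simp [hp, he]
      · have hpf : pvIsPrimeB (s + 2) = false := by
          cases h : pvIsPrimeB (s + 2)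
          · rfl
          · exact absurd h hp
        have hne : t ≠ s + 2 := fun h => hp (h ▸ ht)
        unfold pvOddScan
        simp only [hpf, Bool.false_eq_true, if_false]
        exact ih (s + 2) ht (fun u hu1 hu2 hu3 => hmin u (by omega) hu2 (by omega))
          (by omega) (by omega) (by omega)

-- for an odd prime s0 ≥ 3, A's +1-scan and B's +2-scan both reach the next prime
theorem pvNext_eq_odd (s0 : Int) (h3 : 3 ≤ s0) (hp : pvIfPrime s0 = true) :
    pvNextA s0 = pvOddScan (s0.toNat + 2) s0 := by
  have h2 : 2 ≤ s0 := by omega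
  have hm := (pvIfPrime_iff s0 h2).mp hp
  set m0 := s0.toNat with hm0
  have hcast : ((m0 : Int)) = s0 := Int.toNat_of_nonneg (by omega)
  obtain ⟨q, hq, hq1, hq2⟩ := Nat.exists_prime_lt_and_le_two_mul m0 (by omega)
  have hex : ∃ p, m0 < p ∧ p.Prime := ⟨q, hq1, hq⟩
  set tn := Nat.find hex with htn
  obtain ⟨htn1, htn2⟩ := Nat.find_spec hex
  have htmin : ∀ u : Nat, u < tn → ¬ (m0 < u ∧ u.Prime) := fun u hu => Nat.find_min hex hu
  have htb : tn ≤ 2 * m0 := by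
    by_contra hgt
    exact (htmin q (by omega)) ⟨hq1, hq⟩
  set t := ((tn : Nat) : Int) with ht
  have httn : t.toNat = tn := by simp [ht]
  have ht2 : 2 ≤ t := by have := htn2.two_le; omega
  have hst : s0 < t := by omega
  have hm03 : 3 ≤ m0 := by omega
  have hodd0 : m0 % 2 = 1 := by
    rcases hm.eq_two_or_odd with h | h
    · omega
    · exact h
  have hoddt : tn % 2 = 1 := by
    rcases htn2.eq_two_or_odd with h | h
    · omega
    · exact h
  have hnp : ∀ u : Int, s0 < u → u < t → pvIfPrime u = false := by
    intro u hu1 hu2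
    have hu2' : 2 ≤ u := by omega
    have hun : m0 < u.toNat ∧ u.toNat < tn := by omega
    cases hx : pvIfPrime u with
    | false => rfl
    | true =>
        exact absurd ⟨hun.1, (pvIfPrime_iff u hu2').mp hx⟩ (htmin u.toNat hun.2)
  have htp : pvIfPrime t = true := (pvIfPrime_iff t ht2).mpr (by rw [httn]; exact htn2)
  have hA : pvNextA s0 = t :=
    pvScanA_eq t (2 * s0.toNat + 4) s0 htp hnp hst (by omega)
  have htpB : pvIsPrimeB t = true := by rw [← pvPrime_agree t (by omega)]; exact htp
  have hB : pvOddScan (s0.toNat + 2) s0 = t := by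
    apply pvScanB_eq t (s0.toNat + 2) s0 htpB
    · intro u hu1 hu2 _
      rw [← pvPrime_agree u (by omega)]
      exact hnp u hu1 hu2
    · exact hst
    · omega
    · omega
  rw [hA, hB]

-- ===== VERDICT (by name: the statement is the Claim_ definition above) =====
theorem swap_strategy_spec : Claim_equal_swap_strategy := by
  intro score opponent_score margin num_rolls _
  unfold Spec_swap_strategy swap_strategy swap_strategy_alt pvFreeBacon
  have hmn : 0 ≤ PySem.Int.mod opponent_score 10 := PySem.Int.mod_nonneg (a := opponent_score) (by norm_num)
  set s0 := max (PySem.Int.floordiv opponent_score 10) (PySem.Int.mod opponent_score 10) + 1 with hs0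
  have h1 : 1 ≤ s0 := by
    have := le_trans hmn (le_max_right (PySem.Int.floordiv opponent_score 10) (PySem.Int.mod opponent_score 10))
    omega
  by_cases hp : pvIfPrime s0 = true
  · have hpB : pvIsPrimeB s0 = true := by rw [← pvPrime_agree s0 h1]; exact hp
    by_cases h2 : s0 = 2
    · rw [h2] at hp hpB
      have hn23 : pvNextA 2 = 3 := by decide
      simp [hp, hpB, h2, hn23]
    · have h3 : 3 ≤ s0 := by
        rcases (by omega : s0 = 1 ∨ s0 = 2 ∨ 3 ≤ s0) with h | h | h
        · rw [h] at hp; exact absurd hp (by decide)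
        · exact absurd h h2
        · exact h
      simp [hp, hpB, h2, pvNext_eq_odd s0 h3 hp]
  · have hpB : pvIsPrimeB s0 = false := by rw [← pvPrime_agree s0 h1]; simpa using hp
    simp [hp, hpB]
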